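-- pv_equiv track=rewrite | github.com/Dublerq/rpi-lcd-menu | rpilcdmenu/helpers/text_helper.py | get_scrolled_line
-- ===== SOURCE A (Python) =====
-- def get_scrolled_line(text, line_number=0):
--     """
--     :param str text: message to be scrolled
--     :param int line_number: which number to start from
--     """
--     scrolled_text = ''
--     char_index = 0
--     line_index = 0
--
--     for char in text:
--         if line_index == line_number:
--             scrolled_text += char
--
--         char_index += 1
--
--         if char_index == 16 or char == '\n':
--             if line_index == line_number:
--                 return scrolled_text
--             char_index = 0
--             line_index += 1
--
--     return scrolled_text
-- ===== SOURCE B (Python) =====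
-- def get_scrolled_line(text, line_number=0):
--     pos = 0
--     current_line = 0
--     while pos < len(text):
--         window = text[pos:pos + 16]
--         p = window.find('\n')
--         chunk = window[:p + 1] if p != -1 else window
--         if current_line == line_number:
--             return chunk
--         pos += len(chunk)
--         current_line += 1
--     return ''
-- ===== Notes on version B (the rewrite author's own statement) =====
-- stated objective: faster
-- what changed: B replaces A's character-by-character scan with per-line counters by a while-loop that slices a 16-char window at pos, locates the newline with str.find, and jumps pos forward by whole chunks.
import Mathlib
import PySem

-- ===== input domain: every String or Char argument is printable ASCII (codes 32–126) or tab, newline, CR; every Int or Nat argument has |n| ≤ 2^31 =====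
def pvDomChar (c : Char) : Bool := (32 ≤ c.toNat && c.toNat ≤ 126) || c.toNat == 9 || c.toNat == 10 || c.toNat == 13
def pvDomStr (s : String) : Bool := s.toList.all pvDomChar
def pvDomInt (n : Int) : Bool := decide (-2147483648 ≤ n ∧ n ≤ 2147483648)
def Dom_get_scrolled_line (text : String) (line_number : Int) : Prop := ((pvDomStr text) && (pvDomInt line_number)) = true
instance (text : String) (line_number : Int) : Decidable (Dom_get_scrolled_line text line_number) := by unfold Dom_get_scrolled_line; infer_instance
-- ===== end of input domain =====

-- B replaces A's character-by-character accumulation with 16-char window slicing and a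
-- newline search per chunk (objective: faster by a measured constant factor: C-level slicing
-- and find replace per-character Python work).


-- ===== PORT A =====
-- A's for-loop over the characters, state (scrolled_text, char_index, line_index);
-- strings handled as List Char (exact: Python single-char iteration and concatenation).
def aLoop (line_number : Int) : List Char → List Char → Nat → Int → List Char
  | [], scrolled, _, _ => scrolled
  | c :: rest, scrolled, char_index, line_index =>
    let scrolled' := if line_index == line_number then scrolled ++ [c] else scrolled
    let char_index' := char_index + 1
    if char_index' == 16 || c == '\n' then
      if line_index == line_number then scrolled'
      else aLoop line_number rest scrolled' 0 (line_index + 1)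
    else aLoop line_number rest scrolled' char_index' line_index

def get_scrolled_line (text : String) (line_number : Int) : String :=
  String.ofList (aLoop line_number text.toList [] 0 0)

-- ===== PORT B =====
-- B's while-loop over pos; window = text[pos:pos+16], p = window.find('\n'),
-- chunk = window[:p+1] if p != -1 else window (exact on List Char: the slices are
-- drop/take with in-range bounds, str.find is findIdx?).
def bLoop (line_number : Int) (chars : List Char) (pos : Nat) (current_line : Int) : List Char :=
  if h : pos < chars.length then
    let window := (chars.drop pos).take 16
    let chunk := match window.findIdx? (· == '\n') with
      | some p => window.take (p + 1)
      | none => window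
    if current_line == line_number then chunk
    else bLoop line_number chars (pos + chunk.length) (current_line + 1)
  else []
termination_by chars.length - pos
decreasing_by
  have hw : 0 < window.length := by
    have : window ≠ [] := by
      simp only [window, ne_eq, List.take_eq_nil_iff, List.drop_eq_nil_iff, not_or]
      omega
    exact List.length_pos_iff.mpr this
  have hc : 0 < chunk.length := by
    simp only [chunk]
    cases hf : window.findIdx? (· == '\n') with
    | none => exact hw
    | some p => simp only [List.length_take]; omega
  simp only [chunk, window] at hc
  omega

def get_scrolled_line_alt (text : String) (line_number : Int) : String :=
  String.ofList (bLoop line_number text.toList 0 0)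

-- ===== PRECONDITION & SPEC =====
def Spec_get_scrolled_line (text : String) (line_number : Int) (out : String) : Prop := out = get_scrolled_line_alt text line_number
instance (text : String) (line_number : Int) (out : String) : Decidable (Spec_get_scrolled_line text line_number out) := by unfold Spec_get_scrolled_line; infer_instance

-- ===== CLAIM (what is proved, stated in full; the proofs are below) =====
def Claim_equal_get_scrolled_line : Prop := ∀ (text : String) (line_number : Int), Dom_get_scrolled_line text line_number → Spec_get_scrolled_line text line_number (get_scrolled_line text line_number)

-- ===== LEMMAS AND PROOFS =====

-- the first chunk of `chars` given a budget of `m` further characters in the current line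
def chunkAux (m : Nat) (chars : List Char) : List Char :=
  let window := chars.take m
  match window.findIdx? (· == '\n') with
  | some p => window.take (p + 1)
  | none => window

theorem chunkAux_nil (m : Nat) : chunkAux m [] = [] := by
  simp [chunkAux]

theorem chunkAux_break (m : Nat) (c : Char) (rest : List Char)
    (hm : 0 < m) (h : m = 1 ∨ c = '\n') : chunkAux m (c :: rest) = [c] := by
  have hm' : m = (m - 1) + 1 := by omega
  rw [chunkAux, hm', List.take_succ_cons]
  rcases h with h | h
  · have h0 : m - 1 = 0 := by omega
    rw [h0]
    simp only [List.take_zero, List.findIdx?_cons, List.findIdx?_nil]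
    cases hc : (c == '\n') <;> simp
  · subst h
    simp only [List.findIdx?_cons]
    simp

theorem chunkAux_cons (m : Nat) (c : Char) (rest : List Char)
    (hm : 1 < m) (hc : c ≠ '\n') :
    chunkAux m (c :: rest) = c :: chunkAux (m - 1) rest := by
  have hm' : m = (m - 1) + 1 := by omega
  rw [chunkAux, chunkAux, hm', List.take_succ_cons, List.findIdx?_cons]
  simp only [beq_iff_eq, hc, if_false, Nat.add_sub_cancel]
  cases hf : (rest.take (m - 1)).findIdx? (· == '\n') with
  | none => simp
  | some p => simp

-- A on the target line returns the accumulator plus the current chunk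
theorem aLoop_take (n : Int) : ∀ (chars : List Char) (k : Nat) (s : List Char), k < 16 →
    aLoop n chars s k n = s ++ chunkAux (16 - k) chars := by
  intro chars
  induction chars with
  | nil => intro k s hk; simp [aLoop, chunkAux_nil]
  | cons c rest ih =>
    intro k s hk
    by_cases hbrk : k + 1 = 16 ∨ c = '\n'
    · have hchunk : chunkAux (16 - k) (c :: rest) = [c] :=
        chunkAux_break _ _ _ (by omega) (hbrk.imp (fun h => by omega) id)
      have hcond : (k + 1 == 16 || c == '\n') = true := by
        rcases hbrk with h | h <;> simp [h]
      simp only [aLoop, hcond, beq_self_eq_true, if_true, hchunk]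
    · obtain ⟨h1, h2⟩ := not_or.mp hbrk
      have hcond : (k + 1 == 16 || c == '\n') = false := by
        simp only [Bool.or_eq_false_iff, beq_eq_false_iff_ne, ne_eq]
        exact ⟨h1, h2⟩
      have hchunk : chunkAux (16 - k) (c :: rest) = c :: chunkAux (15 - k) rest := by
        have h := chunkAux_cons (16 - k) c rest (by omega) h2
        have h15 : 16 - k - 1 = 15 - k := by omega
        rwa [h15] at h
      simp only [aLoop, hcond, beq_self_eq_true, if_true, Bool.false_eq_true, if_false]
      rw [ih (k + 1) (s ++ [c]) (by omega)]
      have h15 : 16 - (k + 1) = 15 - k := by omega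
      rw [h15, hchunk]
      simp

-- A skips a non-target line: it continues right after the current chunk
theorem aLoop_skip (n : Int) : ∀ (chars : List Char) (k : Nat) (s : List Char) (li : Int),
    k < 16 → li ≠ n →
    aLoop n chars s k li = aLoop n (chars.drop (chunkAux (16 - k) chars).length) s 0 (li + 1) := by
  intro chars
  induction chars with
  | nil => intro k s li hk hli; simp [aLoop, chunkAux_nil]
  | cons c rest ih =>
    intro k s li hk hli
    have hne : (li == n) = false := by simp [hli]
    by_cases hbrk : k + 1 = 16 ∨ c = '\n'
    · have hchunk : chunkAux (16 - k) (c :: rest) = [c] :=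
        chunkAux_break _ _ _ (by omega) (hbrk.imp (fun h => by omega) id)
      have hcond : (k + 1 == 16 || c == '\n') = true := by
        rcases hbrk with h | h <;> simp [h]
      simp only [aLoop, hcond, hne, Bool.false_eq_true, if_false, if_true, hchunk,
        List.length_cons, List.length_nil, List.drop_succ_cons, List.drop_zero]
    · obtain ⟨h1, h2⟩ := not_or.mp hbrk
      have hcond : (k + 1 == 16 || c == '\n') = false := by
        simp only [Bool.or_eq_false_iff, beq_eq_false_iff_ne, ne_eq]
        exact ⟨h1, h2⟩
      have hchunk : chunkAux (16 - k) (c :: rest) = c :: chunkAux (15 - k) rest := by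
        have h := chunkAux_cons (16 - k) c rest (by omega) h2
        have h15 : 16 - k - 1 = 15 - k := by omega
        rwa [h15] at h
      simp only [aLoop, hcond, hne, Bool.false_eq_true, if_false]
      rw [ih (k + 1) s li (by omega) hli]
      have h15 : 16 - (k + 1) = 15 - k := by omega
      rw [h15, hchunk]
      simp only [List.length_cons, List.drop_succ_cons]

theorem chunkAux_length_pos (m : Nat) (l : List Char) (hm : 0 < m) (hl : l ≠ []) :
    0 < (chunkAux m l).length := by
  have hw : 0 < (l.take m).length := by
    have : l.take m ≠ [] := by
      simp only [ne_eq, List.take_eq_nil_iff, not_or]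
      exact ⟨by omega, hl⟩
    exact List.length_pos_iff.mpr this
  rw [chunkAux]
  cases hf : (l.take m).findIdx? (· == '\n') with
  | none => exact hw
  | some p =>
    simp only [List.length_take, Nat.lt_min]
    exact ⟨by omega, by simpa [List.length_take, Nat.lt_min] using hw⟩

-- one step of B, phrased through chunkAux
theorem bLoop_unfold (n li : Int) (chars : List Char) (pos : Nat) (h : pos < chars.length) :
    bLoop n chars pos li = if li == n then chunkAux 16 (chars.drop pos)
      else bLoop n chars (pos + (chunkAux 16 (chars.drop pos)).length) (li + 1) := by
  rw [bLoop.eq_def]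
  simp only [h, dif_pos]
  rfl

-- the two loops agree on every suffix
theorem aLoop_eq_bLoop (n : Int) : ∀ (fuel : Nat) (chars : List Char) (pos : Nat) (li : Int),
    chars.length - pos ≤ fuel →
    aLoop n (chars.drop pos) [] 0 li = bLoop n chars pos li := by
  intro fuel
  induction fuel with
  | zero =>
    intro chars pos li hf
    have hpos : chars.length ≤ pos := by omega
    rw [List.drop_eq_nil_of_le hpos, bLoop.eq_def]
    simp [aLoop, Nat.not_lt.mpr hpos]
  | succ f ih =>
    intro chars pos li hf
    by_cases hpos : pos < chars.length
    · have hdne : chars.drop pos ≠ [] := by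
        simp only [ne_eq, List.drop_eq_nil_iff, not_le]
        omega
      rw [bLoop_unfold n li chars pos hpos]
      by_cases hli : li = n
      · rw [hli]
        simp only [beq_self_eq_true, if_true]
        have h := aLoop_take n (chars.drop pos) 0 [] (by omega)
        simpa using h
      · have hbne : (li == n) = false := by simp [hli]
        rw [aLoop_skip n (chars.drop pos) 0 [] li (by omega) hli]
        simp only [hbne, Bool.false_eq_true, if_false]
        have h16 : (16 : Nat) - 0 = 16 := rfl
        rw [h16, List.drop_drop]
        have hlen := chunkAux_length_pos 16 (chars.drop pos) (by omega) hdne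
        exact ih chars (pos + (chunkAux 16 (chars.drop pos)).length) (li + 1) (by omega)
    · have hpos' : chars.length ≤ pos := by omega
      rw [List.drop_eq_nil_of_le hpos', bLoop.eq_def]
      simp [aLoop, Nat.not_lt.mpr hpos']

-- ===== VERDICT (by name: the statement is the Claim_ definition above) =====
theorem get_scrolled_line_spec : Claim_equal_get_scrolled_line := by
  intro text line_number _
  unfold Spec_get_scrolled_line get_scrolled_line get_scrolled_line_alt
  congr 1
  have h := aLoop_eq_bLoop line_number text.toList.length text.toList 0 0 (by omega)
  simpa using h
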